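-- pv_equiv track=rewrite | github.com/DaveXRouz/NPS | v4/services/oracle/oracle_service/engines/fc60.py | to_base60
-- ===== SOURCE A (Python) =====
-- def to_base60(n):
--     """Convert non-negative integer to list of base-60 digits (most significant first)."""
--     if n == 0:
--         return [0]
--     digits = []
--     while n > 0:
--         digits.insert(0, n % 60)
--         n //= 60
--     return digits
-- ===== SOURCE B (Python) =====
-- def to_base60(n):
--     """Convert non-negative integer to list of base-60 digits (most significant first)."""
--     if n == 0:
--         return [0]
--     p = 1
--     while p * 60 <= n:
--         p *= 60
--     out = []
--     while p >= 1:
--         out.append((n // p) % 60)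
--         p //= 60
--     return out
-- ===== Notes on version B (the rewrite author's own statement) =====
-- stated objective: alternative
-- what changed: B finds the top base power not exceeding n by multiplying up, then emits digits most-significant-first by positional division, instead of A's divide-and-prepend loop; Pre_ excludes negative n, outside the docstring's non-negative domain, where neither program's value is specified (A's loop body never runs and B emits a single positional digit).
-- outside the precondition, e.g. on to_base60(-5): A returns [], B returns [55]
import Mathlib
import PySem

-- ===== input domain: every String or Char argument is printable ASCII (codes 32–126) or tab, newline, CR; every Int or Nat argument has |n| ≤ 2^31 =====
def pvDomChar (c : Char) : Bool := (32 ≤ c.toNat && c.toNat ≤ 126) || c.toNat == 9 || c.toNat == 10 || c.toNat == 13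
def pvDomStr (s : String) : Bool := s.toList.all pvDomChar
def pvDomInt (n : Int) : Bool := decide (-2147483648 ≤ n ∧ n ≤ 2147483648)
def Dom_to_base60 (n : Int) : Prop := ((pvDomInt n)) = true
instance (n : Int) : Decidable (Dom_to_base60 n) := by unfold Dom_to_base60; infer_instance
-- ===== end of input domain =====

-- B finds the top power of 60 first and emits digits most-significant-first by positional
-- division, instead of A's divide-and-prepend loop (objective: alternative decomposition).


-- ===== PORT A =====
-- termination measures of the three loops, named so the ports can cite them
theorem pvDecDiv60 (n : Int) (h : 0 < n) : (PySem.Int.floordiv n 60).toNat < n.toNat := by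
  rw [PySem.Int.floordiv_eq_ediv_of_pos (by decide : (0:Int) < 60)]
  exact (Int.toNat_lt_toNat h).mpr
    ((Int.ediv_lt_iff_lt_mul (by decide)).mpr (lt_mul_of_one_lt_right h (by decide : (1:Int) < 60)))

theorem pvDecDiv60' (p : Int) (h : 1 ≤ p) : (PySem.Int.floordiv p 60).toNat < p.toNat :=
  pvDecDiv60 p (lt_of_lt_of_le zero_lt_one h)

theorem pvDecFind (n p : Int) (h : 0 < p ∧ p * 60 ≤ n) : (n - p * 60).toNat < (n - p).toNat :=
  have hp : p < p * 60 := lt_mul_of_one_lt_right h.1 (by decide : (1:Int) < 60)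
  (Int.toNat_lt_toNat (sub_pos.mpr (lt_of_lt_of_le hp h.2))).mpr (sub_lt_sub_left hp n)

-- while n > 0: digits.insert(0, n % 60); n //= 60
def to_base60_loop (n : Int) (digits : List Int) : List Int :=
  if _h : 0 < n then
    to_base60_loop (PySem.Int.floordiv n 60) (PySem.Int.mod n 60 :: digits)
  else digits
termination_by n.toNat
decreasing_by exact pvDecDiv60 n _h

def to_base60 (n : Int) : List Int :=
  if n = 0 then [0] else to_base60_loop n []

-- ===== PORT B =====
-- while p * 60 <= n: p *= 60   (0 < p is a totality guard; B always starts at p = 1)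
def pvFindPow (n p : Int) : Int :=
  if h : 0 < p ∧ p * 60 ≤ n then pvFindPow n (p * 60) else p
termination_by (n - p).toNat
decreasing_by exact pvDecFind n p h

-- while p >= 1: out.append((n // p) % 60); p //= 60
def pvEmit (n p : Int) : List Int :=
  if _h : 1 ≤ p then
    PySem.Int.mod (PySem.Int.floordiv n p) 60 :: pvEmit n (PySem.Int.floordiv p 60)
  else []
termination_by p.toNat
decreasing_by exact pvDecDiv60' p _h

def to_base60_alt (n : Int) : List Int :=
  if n = 0 then [0] else pvEmit n (pvFindPow n 1)

-- ===== PRECONDITION & SPEC =====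
-- Pre_ excludes negative n, outside the function's documented non-negative domain, where neither
-- value is specified: A's loop body never runs and B emits a single positional digit.
def Pre_to_base60 (n : Int) : Prop := 0 ≤ n
instance (n : Int) : Decidable (Pre_to_base60 n) := by unfold Pre_to_base60; infer_instance
def pvWitness_to_base60 : Int := (3600)

def Spec_to_base60 (n : Int) (out : List Int) : Prop := out = to_base60_alt n
instance (n : Int) (out : List Int) : Decidable (Spec_to_base60 n out) := by unfold Spec_to_base60; infer_instance

-- ===== CLAIM (what is proved, stated in full; the proofs are below) =====
def Claim_equal_to_base60 : Prop := ∀ (n : Int), Dom_to_base60 n → Pre_to_base60 n → Spec_to_base60 n (to_base60 n)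

-- ===== LEMMAS AND PROOFS =====

theorem emit_step (n p : Int) (hp : 1 ≤ p) :
    pvEmit n p = PySem.Int.mod (PySem.Int.floordiv n p) 60 :: pvEmit n (PySem.Int.floordiv p 60) := by
  rw [pvEmit]; simp [hp]

theorem floordiv_pos_eq (a b : Int) (hb : 0 < b) : PySem.Int.floordiv a b = a / b :=
  PySem.Int.floordiv_eq_ediv_of_pos hb

theorem emit_zero (n : Int) : pvEmit n 0 = [] := by
  rw [pvEmit]; norm_num

theorem emit_one (n : Int) : pvEmit n 1 = [n % 60] := by
  rw [emit_step n 1 le_rfl]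
  rw [show PySem.Int.floordiv (1:Int) 60 = 0 by
    rw [floordiv_pos_eq _ _ (by norm_num)]; decide]
  rw [emit_zero, floordiv_pos_eq _ _ one_pos, Int.ediv_one,
    PySem.Int.mod_eq_emod_of_pos (show (0:Int) < 60 by norm_num)]

theorem emit_pow_succ (n : Int) (m : Nat) :
    pvEmit n ((60 : Int) ^ (m + 1)) =
      PySem.Int.mod (PySem.Int.floordiv n ((60 : Int) ^ (m + 1))) 60 :: pvEmit n ((60 : Int) ^ m) := by
  have hpow : (1 : Int) ≤ (60 : Int) ^ (m + 1) := one_le_pow₀ (by norm_num)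
  rw [emit_step n _ hpow]
  rw [show PySem.Int.floordiv ((60 : Int) ^ (m + 1)) 60 = (60 : Int) ^ m by
    rw [floordiv_pos_eq _ _ (by norm_num), pow_succ, Int.mul_ediv_cancel _ (by norm_num)]]

-- pvEmit at a higher power peels the LAST digit
theorem emit_shift (k : Nat) : ∀ n : Int, 0 ≤ n →
    pvEmit n ((60 : Int) ^ (k + 1)) = pvEmit (n / 60) ((60 : Int) ^ k) ++ [n % 60] := by
  induction k with
  | zero =>
      intro n hn
      rw [emit_pow_succ]; simp only [pow_zero]; rw [emit_one, emit_one]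
      norm_num [floordiv_pos_eq _ _ (show (0:Int) < 60 by norm_num),
        PySem.Int.mod_eq_emod_of_pos (show (0:Int) < 60 by norm_num)]
  | succ m ih =>
      intro n hn
      rw [emit_pow_succ n (m + 1), emit_pow_succ (n / 60) m, ih n hn]
      have h1 : n / 60 / (60 : Int) ^ (m + 1) = n / (60 : Int) ^ (m + 2) := by
        rw [Int.ediv_ediv_of_nonneg (by norm_num : (0:Int) ≤ 60), ← pow_succ']
      rw [floordiv_pos_eq _ _ (show (0:Int) < (60:Int) ^ (m+2) by positivity),
        floordiv_pos_eq _ _ (show (0:Int) < (60:Int) ^ (m+1) by positivity), h1]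
      simp

theorem loop_acc (n : Int) : ∀ acc : List Int,
    to_base60_loop n acc = to_base60_loop n [] ++ acc := by
  by_cases hn : 0 < n
  · have hlt : (PySem.Int.floordiv n 60).toNat < n.toNat := by
      rw [floordiv_pos_eq _ _ (by norm_num)]; omega
    intro acc
    rw [to_base60_loop]
    conv_rhs => rw [to_base60_loop]
    simp only [hn, dite_true]
    rw [loop_acc (PySem.Int.floordiv n 60) (PySem.Int.mod n 60 :: acc),
        loop_acc (PySem.Int.floordiv n 60) [PySem.Int.mod n 60]]
    simp
  · intro acc
    rw [to_base60_loop]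
    conv_rhs => rw [to_base60_loop]
    simp [hn]
termination_by n.toNat
decreasing_by all_goals exact hlt

-- A's loop equals B's positional emitter when started at the right power of 60
theorem loop_eq_emit (n : Int) : ∀ k : Nat, 0 < n → (60 : Int) ^ k ≤ n → n < (60 : Int) ^ (k + 1) →
    to_base60_loop n [] = pvEmit n ((60 : Int) ^ k) := by
  intro k
  induction k generalizing n with
  | zero =>
      intro hn hlo hhi
      rw [pow_zero, emit_one, to_base60_loop]
      simp only [hn, dite_true]
      have hd : PySem.Int.floordiv n 60 = 0 := by
        rw [floordiv_pos_eq _ _ (by norm_num)]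
        simp only [zero_add, pow_one] at hhi
        omega
      rw [hd, to_base60_loop]
      simp
  | succ m ih =>
      intro hn hlo hhi
      rw [to_base60_loop]
      simp only [hn, dite_true]
      have h60 : (0 : Int) < 60 := by norm_num
      have hq : PySem.Int.floordiv n 60 = n / 60 := floordiv_pos_eq _ _ h60
      have hm : PySem.Int.mod n 60 = n % 60 := PySem.Int.mod_eq_emod_of_pos h60
      have hlo' : (60 : Int) ^ m ≤ n / 60 := by
        rw [Int.le_ediv_iff_mul_le h60, ← pow_succ]; exact hlo
      have hhi' : n / 60 < (60 : Int) ^ (m + 1) := by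
        rw [Int.ediv_lt_iff_lt_mul h60, ← pow_succ]; exact hhi
      have hpos : 0 < n / 60 := lt_of_lt_of_le (by positivity) hlo'
      rw [hq, hm, loop_acc, ih (n / 60) hpos hlo' hhi',
        emit_shift m n (le_of_lt hn)]

-- pvFindPow started at a positive p ≤ n returns p * 60^k bracketing n
theorem findPow_spec (n : Int) : ∀ p : Int, 0 < p → p ≤ n →
    ∃ k : Nat, pvFindPow n p = p * (60 : Int) ^ k ∧
      p * (60 : Int) ^ k ≤ n ∧ n < p * (60 : Int) ^ (k + 1) := by
  intro p hp hpn
  rw [pvFindPow]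
  by_cases h : p * 60 ≤ n
  · simp only [hp, h, and_self, dite_true]
    obtain ⟨k, hk1, hk2, hk3⟩ := findPow_spec n (p * 60) (by omega) h
    exact ⟨k + 1, by rw [hk1]; ring, by rw [show p * (60:Int)^(k+1) = p * 60 * 60^k by ring]; exact hk2,
      by rw [show p * (60:Int)^(k+2) = p * 60 * 60^(k+1) by ring]; exact hk3⟩
  · simp only [hp, h, and_false, dite_false]
    exact ⟨0, by ring, by simpa using hpn, by simpa [pow_one] using h⟩
termination_by p => (n - p).toNat
decreasing_by omega

-- ===== VERDICT (by name: the statement is the Claim_ definition above) =====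
theorem to_base60_spec : Claim_equal_to_base60 := by
  intro n _ hpre
  unfold Spec_to_base60 to_base60 to_base60_alt
  by_cases h0 : n = 0
  · simp [h0]
  · simp only [h0, if_false]
    have hn : 0 < n := lt_of_le_of_ne hpre (Ne.symm h0)
    obtain ⟨k, hk1, hk2, hk3⟩ := findPow_spec n 1 (by norm_num) (by omega)
    simp only [one_mul] at hk1 hk2 hk3
    rw [hk1]
    exact loop_eq_emit n k hn hk2 hk3
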